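-- pv_equiv track=rewrite | github.com/zafarshodmonov/codeforces | problemset.py | F116A_processing
-- ===== SOURCE A (Python) =====
-- def F116A_processing(nums):
--     zamax = 0
--     temp = 0
--     for zatuple in nums:
--         temp += zatuple[1]
--         temp -= zatuple[0]
--         zamax = max(zamax, temp)
--     return zamax
-- ===== SOURCE B (Python) =====
-- def F116A_processing(nums):
--     # Backward (Kadane-style) pass: best is the maximum, floored at 0, of the
--     # sums of prefixes of the suffix seen so far; no running total is kept.
--     best = 0
--     for zatuple in reversed(nums):
--         best = max(0, (zatuple[1] - zatuple[0]) + best)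
--     return best
-- ===== Notes on version B (the rewrite author's own statement) =====
-- stated objective: alternative
-- what changed: A scans forward keeping a running prefix sum and its running max; B scans the list backwards keeping a single value (the max-prefix-sum of the suffix, floored at 0), a Kadane-style recurrence with no running total and no max accumulator.
import Mathlib
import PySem

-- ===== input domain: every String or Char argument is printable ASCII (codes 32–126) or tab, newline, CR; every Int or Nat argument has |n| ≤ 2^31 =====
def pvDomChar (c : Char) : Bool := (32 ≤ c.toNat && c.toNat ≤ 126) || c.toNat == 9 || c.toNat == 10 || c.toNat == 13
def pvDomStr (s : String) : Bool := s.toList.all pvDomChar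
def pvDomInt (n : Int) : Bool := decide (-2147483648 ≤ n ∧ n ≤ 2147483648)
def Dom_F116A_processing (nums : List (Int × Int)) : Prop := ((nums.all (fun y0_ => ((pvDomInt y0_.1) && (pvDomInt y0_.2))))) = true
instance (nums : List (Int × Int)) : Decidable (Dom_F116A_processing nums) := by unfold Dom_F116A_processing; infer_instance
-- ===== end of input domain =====

-- B replaces A's forward running-sum/running-max scan by a single backward Kadane-style pass keeping one accumulator (alternative decomposition, same cost).


-- ===== PORT A =====
-- state (zamax, temp); temp += t[1]; temp -= t[0]; zamax = max(zamax, temp)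
def F116A_processing (nums : List (Int × Int)) : Int :=
  (nums.foldl (fun (s : Int × Int) zatuple =>
      let temp := s.2 + zatuple.2 - zatuple.1
      (max s.1 temp, temp)) (0, 0)).1

-- ===== PORT B =====
-- 'for zatuple in reversed(nums)' with accumulator best: a foldl over nums.reverse
def F116A_processing_alt (nums : List (Int × Int)) : Int :=
  nums.reverse.foldl (fun (best : Int) zatuple =>
      max 0 ((zatuple.2 - zatuple.1) + best)) 0

-- ===== PRECONDITION & SPEC =====
def Spec_F116A_processing (nums : List (Int × Int)) (out : Int) : Prop := out = F116A_processing_alt nums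
instance (nums : List (Int × Int)) (out : Int) : Decidable (Spec_F116A_processing nums out) := by unfold Spec_F116A_processing; infer_instance

-- ===== CLAIM (what is proved, stated in full; the proofs are below) =====
def Claim_equal_F116A_processing : Prop := ∀ (nums : List (Int × Int)), Dom_F116A_processing nums → Spec_F116A_processing nums (F116A_processing nums)

-- ===== LEMMAS AND PROOFS =====

-- B's backward fold written as a foldr (the shape the induction uses)
def pvBest (nums : List (Int × Int)) : Int :=
  nums.foldr (fun zatuple best => max 0 ((zatuple.2 - zatuple.1) + best)) 0

theorem pvBest_nonneg (nums : List (Int × Int)) : 0 ≤ pvBest nums := by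
  induction nums with
  | nil => simp [pvBest]
  | cons p ps ih => simp only [pvBest, List.foldr_cons] at *; omega

theorem pv_alt_eq_best (nums : List (Int × Int)) : F116A_processing_alt nums = pvBest nums := by
  unfold F116A_processing_alt pvBest
  rw [List.foldl_reverse]

-- Invariant of A's fold: from any state (m, t) with t ≤ m the final zamax is max m (t + pvBest nums).
theorem pv_inv (nums : List (Int × Int)) : ∀ (m t : Int), t ≤ m →
    (nums.foldl (fun (s : Int × Int) zatuple =>
        let temp := s.2 + zatuple.2 - zatuple.1
        (max s.1 temp, temp)) (m, t)).1 = max m (t + pvBest nums) := by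
  induction nums with
  | nil => intro m t h; simp [pvBest]; omega
  | cons p ps ih =>
    intro m t h
    have hB := pvBest_nonneg ps
    simp only [pvBest] at hB
    simp only [List.foldl_cons]
    rw [ih (max m (t + p.2 - p.1)) (t + p.2 - p.1) (le_max_right _ _)]
    simp only [pvBest, List.foldr_cons]
    omega

-- ===== VERDICT (by name: the statement is the Claim_ definition above) =====
theorem F116A_processing_spec : Claim_equal_F116A_processing := by
  intro nums _
  unfold Spec_F116A_processing F116A_processing
  rw [pv_alt_eq_best, pv_inv nums 0 0 le_rfl]
  have := pvBest_nonneg nums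
  omega
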